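-- pv_equiv track=rewrite | github.com/zoe-yyx/Evaluation_MCPGen | utils/error_propagation.py | get_longest_path_from_node
-- ===== SOURCE A (Python) =====
-- from typing import Dict, List, Set, Tuple
--
-- def get_longest_path_from_node(node: str, forward_graph: Dict[str, Set[str]]) -> int:
--     """计算从节点出发的最长路径长度（DFS + 记忆化）"""
--     memo = {}
--
--     def dfs(n: str) -> int:
--         if n in memo:
--             return memo[n]
--
--         children = forward_graph.get(n, set())
--         if not children:
--             memo[n] = 0
--             return 0
--
--         max_child_path = max(dfs(child) for child in children)
--         memo[n] = 1 + max_child_path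
--         return memo[n]
--
--     return dfs(node)
-- ===== SOURCE B (Python) =====
-- def get_longest_path_from_node(node: str, forward_graph) -> int:
--     """Bellman-Ford-style fixed-point iteration instead of memoized recursive DFS."""
--     nodes = {node}
--     for k, ch in forward_graph.items():
--         nodes.add(k)
--         nodes.update(ch)
--     d = {n: 0 for n in nodes}
--     for _ in range(len(nodes)):
--         nd = {}
--         for n in nodes:
--             ch = forward_graph.get(n, set())
--             if not ch:
--                 nd[n] = 0
--             else:
--                 nd[n] = 1 + max(d[c] for c in ch)
--         if nd == d:
--             break
--         d = nd
--     return d[node]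
-- ===== Notes on version B (the rewrite author's own statement) =====
-- stated objective: alternative
-- what changed: Replaces the memoized recursive DFS with a Bellman-Ford-style fixed-point iteration: collect the vertex set, start all depths at 0, and relax every vertex per round until a round changes nothing (at most |V| rounds); no recursion and no memo threading.
import Mathlib
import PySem

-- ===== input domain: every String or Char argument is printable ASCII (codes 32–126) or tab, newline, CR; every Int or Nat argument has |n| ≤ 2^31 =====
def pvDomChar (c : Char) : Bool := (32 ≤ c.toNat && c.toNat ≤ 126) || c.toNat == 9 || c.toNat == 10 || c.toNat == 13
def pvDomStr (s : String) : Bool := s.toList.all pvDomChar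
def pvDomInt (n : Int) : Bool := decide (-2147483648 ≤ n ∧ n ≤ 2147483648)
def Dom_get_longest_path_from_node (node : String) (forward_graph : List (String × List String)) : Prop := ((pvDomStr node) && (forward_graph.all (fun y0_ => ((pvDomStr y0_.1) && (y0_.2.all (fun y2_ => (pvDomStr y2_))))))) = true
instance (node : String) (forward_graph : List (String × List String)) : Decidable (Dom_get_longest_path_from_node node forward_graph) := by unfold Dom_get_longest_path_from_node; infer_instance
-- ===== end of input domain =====

-- B replaces A's memoized recursive DFS by a Bellman-Ford-style fixed-point iteration (alternative algorithm, no recursion).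

-- ===== PORT A =====
-- forward_graph.get(n, set())
def pvChld (g : List (String × List String)) (n : String) : List String :=
  PySem.Dict.getD (PySem.Dict.mk g) n []

-- all strings occurring in the input (used only to size A's fuel guard / Pre_'s bounded reachability)
def pvVerts (node : String) (g : List (String × List String)) : List String :=
  node :: g.flatMap (fun kv => kv.1 :: kv.2)

def pvNv (node : String) (g : List (String × List String)) : Nat :=
  (PySem.List.dedup (pvVerts node g)).length

-- the inner `dfs` of A, with its memo dict; fuel only makes the recursion structural — with the
-- fuel chosen below it is never exhausted on input satisfying Pre_ (proved in the lemmas)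
def pvDfsA (g : List (String × List String)) : Nat → PySem.Dict String Int → String → Int × PySem.Dict String Int
  | 0, memo, _ => (0, memo)
  | f+1, memo, n =>
    match PySem.Dict.get? memo n with
    | some v => (v, memo)
    | none =>
      match pvChld g n with
      | [] => (0, PySem.Dict.insert memo n 0)
      | c :: cs =>
        let r0 := pvDfsA g f memo c
        let r := cs.foldl (fun acc ch =>
          let rc := pvDfsA g f acc.2 ch
          (max acc.1 rc.1, rc.2)) r0
        (1 + r.1, PySem.Dict.insert r.2 n (1 + r.1))

def get_longest_path_from_node (node : String) (forward_graph : List (String × List String)) : Int :=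
  (pvDfsA forward_graph (pvNv node forward_graph + 1) PySem.Dict.empty node).1

-- ===== PORT B =====
-- one relaxation round: nd[n] = 0 if no children else 1 + max(d[c] for c in children)
def pvStepB (g : List (String × List String)) (nodes : List String) (d : PySem.Dict String Int) : PySem.Dict String Int :=
  nodes.foldl (fun nd n =>
    match pvChld g n with
    | [] => PySem.Dict.insert nd n 0
    | c :: cs => PySem.Dict.insert nd n
        (1 + cs.foldl (fun m c' => max m (PySem.Dict.getD d c' 0)) (PySem.Dict.getD d c 0)))
    PySem.Dict.empty

-- the `for _ in range(len(nodes))` loop with its early `break` at the fixed point.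
-- Python's `nd == d` compares dicts ignoring key order; here `nd` and `d` are both built by
-- inserting over `nodes` in the same order every round, so Lean's Dict equality coincides with it.
def pvLoopB (g : List (String × List String)) (nodes : List String) :
    Nat → PySem.Dict String Int → PySem.Dict String Int
  | 0, d => d
  | k+1, d =>
    let nd := pvStepB g nodes d
    if nd = d then d else pvLoopB g nodes k nd

def get_longest_path_from_node_alt (node : String) (forward_graph : List (String × List String)) : Int :=
  let nodes : PySem.Set String := forward_graph.foldl
    (fun s kv => PySem.Set.update (PySem.Set.add s kv.1) kv.2) (PySem.Set.ofList [node])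
  let d0 := nodes.foldl (fun d n => PySem.Dict.insert d n (0 : Int)) PySem.Dict.empty
  let d := pvLoopB forward_graph nodes nodes.length d0
  PySem.Dict.getD d node 0

-- ===== PRECONDITION & SPEC =====
-- bounded-reachability helpers for Pre_ (membership saturates within pvNv steps)
def pvGrow (g : List (String × List String)) (s : List String) : List String :=
  PySem.List.dedup (s ++ s.flatMap (pvChld g))

def pvIter (g : List (String × List String)) : Nat → List String → List String
  | 0, s => s
  | k+1, s => pvIter g k (pvGrow g s)

def pvReach (node : String) (g : List (String × List String)) : List String :=
  pvIter g (pvNv node g) [node]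

def pvDesc (node : String) (g : List (String × List String)) (x : String) : List String :=
  pvIter g (pvNv node g + 1) (pvChld g x)

-- Pre_ excludes exactly the graphs with a directed cycle reachable from node, on which Python A's
-- recursion never terminates (RecursionError); A returns normally on every other input.
def Pre_get_longest_path_from_node (node : String) (forward_graph : List (String × List String)) : Prop :=
  ∀ x ∈ pvReach node forward_graph, x ∉ pvDesc node forward_graph x

instance (node : String) (forward_graph : List (String × List String)) : Decidable (Pre_get_longest_path_from_node node forward_graph) := by
  unfold Pre_get_longest_path_from_node; infer_instance

def pvWitness_get_longest_path_from_node : String × (List (String × List String)) :=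
  ("a", [("a", ["b", "c"]), ("b", ["c"]), ("c", [])])

def Spec_get_longest_path_from_node (node : String) (forward_graph : List (String × List String)) (out : Int) : Prop := out = get_longest_path_from_node_alt node forward_graph
instance (node : String) (forward_graph : List (String × List String)) (out : Int) : Decidable (Spec_get_longest_path_from_node node forward_graph out) := by unfold Spec_get_longest_path_from_node; infer_instance

-- ===== CLAIM (what is proved, stated in full; the proofs are below) =====
def Claim_equal_get_longest_path_from_node : Prop := ∀ (node : String) (forward_graph : List (String × List String)), Dom_get_longest_path_from_node node forward_graph → Pre_get_longest_path_from_node node forward_graph → Spec_get_longest_path_from_node node forward_graph (get_longest_path_from_node node forward_graph)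


-- ===== LEMMAS AND PROOFS =====

-- depth of the longest path, by fuel (the common specification both ports are compared to)
def pvDepth (g : List (String × List String)) : Nat → String → Int
  | 0, _ => 0
  | f+1, n =>
    match pvChld g n with
    | [] => 0
    | c :: cs => 1 + (cs.map (pvDepth g f)).foldl max (pvDepth g f c)

def pvClosed (g : List (String × List String)) (S : List String) : Prop :=
  ∀ x ∈ S, ∀ c ∈ pvChld g x, c ∈ S

def pvPath (g : List (String × List String)) (a : String) (p : List String) : Prop :=
  List.IsChain (fun u v => v ∈ pvChld g u) (a :: p)

-- ---- children / vertex basics ----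

lemma pv_mem_chld_sub (g : List (String × List String)) (n c : String)
    (h : c ∈ pvChld g n) : ∃ kv ∈ g, c ∈ kv.2 := by
  induction g with
  | nil => simp [pvChld, PySem.Dict.getD, PySem.Dict.get?] at h
  | cons kv rest ih =>
    rw [pvChld, PySem.Dict.getD_eq_get?_getD] at h
    rw [show PySem.Dict.mk (kv :: rest) = PySem.Dict.mk ((kv.1, kv.2) :: rest) from rfl,
      PySem.Dict.get?_mk_cons] at h
    by_cases hk : kv.1 == n
    · rw [if_pos hk] at h
      exact ⟨kv, List.mem_cons_self .., by simpa using h⟩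
    · rw [if_neg hk] at h
      obtain ⟨kv', hkv', hc⟩ := ih (by rw [pvChld, PySem.Dict.getD_eq_get?_getD]; exact h)
      exact ⟨kv', List.mem_cons_of_mem _ hkv', hc⟩

lemma pv_chld_sub_verts (node : String) (g : List (String × List String)) (x c : String)
    (h : c ∈ pvChld g x) : c ∈ pvVerts node g := by
  obtain ⟨kv, hkv, hc⟩ := pv_mem_chld_sub g x c h
  simp only [pvVerts, List.mem_cons, List.mem_flatMap]
  exact Or.inr ⟨kv, hkv, Or.inr hc⟩

-- ---- grow / iter ----

lemma pv_mem_grow (g : List (String × List String)) (s : List String) (x : String) :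
    x ∈ pvGrow g s ↔ x ∈ s ∨ ∃ y ∈ s, x ∈ pvChld g y := by
  simp [pvGrow, List.mem_append, List.mem_flatMap]

lemma pv_sub_grow (g : List (String × List String)) (s : List String) (x : String)
    (h : x ∈ s) : x ∈ pvGrow g s := (pv_mem_grow g s x).mpr (Or.inl h)

lemma pv_nodup_grow (g : List (String × List String)) (s : List String) :
    (pvGrow g s).Nodup := PySem.List.nodup_dedup _

lemma pv_grow_sub_verts (node : String) (g : List (String × List String)) (s : List String)
    (hs : ∀ x ∈ s, x ∈ pvVerts node g) : ∀ x ∈ pvGrow g s, x ∈ pvVerts node g := by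
  intro x hx
  rcases (pv_mem_grow g s x).mp hx with h | ⟨y, _, hc⟩
  · exact hs x h
  · exact pv_chld_sub_verts node g y x hc

lemma pv_sub_iter (g : List (String × List String)) (k : Nat) (s : List String) (x : String)
    (h : x ∈ s) : x ∈ pvIter g k s := by
  induction k generalizing s with
  | zero => exact h
  | succ k ih => exact ih _ (pv_sub_grow g s x h)

lemma pv_iter_sub_verts (node : String) (g : List (String × List String)) (k : Nat)
    (s : List String) (hs : ∀ x ∈ s, x ∈ pvVerts node g) :
    ∀ x ∈ pvIter g k s, x ∈ pvVerts node g := by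
  induction k generalizing s with
  | zero => exact hs
  | succ k ih => exact ih _ (pv_grow_sub_verts node g s hs)

lemma pv_grow_congr (g : List (String × List String)) (s t : List String)
    (h : ∀ x, x ∈ s ↔ x ∈ t) : ∀ x, x ∈ pvGrow g s ↔ x ∈ pvGrow g t := by
  intro x
  rw [pv_mem_grow, pv_mem_grow]
  constructor
  · rintro (hx | ⟨y, hy, hc⟩)
    · exact Or.inl ((h x).mp hx)
    · exact Or.inr ⟨y, (h y).mp hy, hc⟩
  · rintro (hx | ⟨y, hy, hc⟩)
    · exact Or.inl ((h x).mpr hx)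
    · exact Or.inr ⟨y, (h y).mpr hy, hc⟩

lemma pv_iter_congr (g : List (String × List String)) (k : Nat) (s t : List String)
    (h : ∀ x, x ∈ s ↔ x ∈ t) : ∀ x, x ∈ pvIter g k s ↔ x ∈ pvIter g k t := by
  induction k generalizing s t with
  | zero => exact h
  | succ k ih => exact ih _ _ (pv_grow_congr g s t h)

lemma pv_grow_memEq_of_closed (g : List (String × List String)) (S : List String)
    (h : pvClosed g S) : ∀ x, x ∈ pvGrow g S ↔ x ∈ S := by
  intro x
  rw [pv_mem_grow]
  constructor
  · rintro (hx | ⟨y, hy, hc⟩)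
    · exact hx
    · exact h y hy x hc
  · exact Or.inl

lemma pv_iter_memEq_of_closed (g : List (String × List String)) (k : Nat) (S : List String)
    (h : pvClosed g S) : ∀ x, x ∈ pvIter g k S ↔ x ∈ S := by
  induction k generalizing S with
  | zero => intro x; rfl
  | succ k ih =>
    intro x
    have h1 := pv_iter_congr g k _ _ (pv_grow_memEq_of_closed g S h) x
    exact (h1.trans (ih S h x))

lemma pv_closed_congr (g : List (String × List String)) (S T : List String)
    (hm : ∀ x, x ∈ S ↔ x ∈ T) (h : pvClosed g S) : pvClosed g T := by
  intro x hx c hc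
  exact (hm c).mp (h x ((hm x).mpr hx) c hc)

-- Nodup + membership-subset gives a length bound (via toFinset cards)
lemma pv_len_le (s t : List String) (hs : s.Nodup) (hsub : ∀ x ∈ s, x ∈ t) :
    s.length ≤ (PySem.List.dedup t).length := by
  have h1 : s.toFinset.card = s.length := List.toFinset_card_of_nodup hs
  have h2 : (PySem.List.dedup t).toFinset.card = (PySem.List.dedup t).length :=
    List.toFinset_card_of_nodup (PySem.List.nodup_dedup t)
  have hsub' : s.toFinset ⊆ (PySem.List.dedup t).toFinset := by
    intro x hx
    rw [List.mem_toFinset] at hx ⊢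
    rw [PySem.List.mem_dedup]
    exact hsub x hx
  calc s.length = s.toFinset.card := h1.symm
    _ ≤ (PySem.List.dedup t).toFinset.card := Finset.card_le_card hsub'
    _ = (PySem.List.dedup t).length := h2

-- saturation: after enough grow steps the iterate is closed under children
lemma pv_iter_closed (node : String) (g : List (String × List String)) :
    ∀ (k : Nat) (s : List String), s.Nodup → (∀ x ∈ s, x ∈ pvVerts node g) →
    pvNv node g ≤ s.length + k → pvClosed g (pvIter g k s) := by
  intro k
  induction k with
  | zero =>
    intro s hnd hsub hlen
    -- s already holds every vertex
    have hle : s.length ≤ pvNv node g := pv_len_le s (pvVerts node g) hnd hsub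
    have hcard : s.toFinset = (pvVerts node g).toFinset := by
      apply Finset.eq_of_subset_of_card_le
      · intro x hx
        rw [List.mem_toFinset] at hx ⊢
        exact hsub x hx
      · rw [List.toFinset_card_of_nodup hnd]
        have h2 : (pvVerts node g).toFinset.card = pvNv node g := by
          have : (pvVerts node g).toFinset = (PySem.List.dedup (pvVerts node g)).toFinset := by
            ext x
            rw [List.mem_toFinset, List.mem_toFinset, PySem.List.mem_dedup]
          rw [this, List.toFinset_card_of_nodup (PySem.List.nodup_dedup _)]
          rfl
        rw [h2]
        omega
    intro x hx c hc
    have hcv : c ∈ pvVerts node g := pv_chld_sub_verts node g x c hc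
    have : c ∈ (pvVerts node g).toFinset := List.mem_toFinset.mpr hcv
    rw [← hcard, List.mem_toFinset] at this
    exact this
  | succ k ih =>
    intro s hnd hsub hlen
    by_cases hall : ∀ x ∈ pvGrow g s, x ∈ s
    · -- no growth: s is closed and the iterate has the same members
      have hcl : pvClosed g s := by
        intro x hx c hc
        exact hall c ((pv_mem_grow g s c).mpr (Or.inr ⟨x, hx, hc⟩))
      have hmem : ∀ x, x ∈ pvIter g (k+1) s ↔ x ∈ s := by
        intro x
        show x ∈ pvIter g k (pvGrow g s) ↔ x ∈ s
        have h1 := pv_iter_congr g k _ _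
          (fun y => ⟨fun h => hall y h, fun h => pv_sub_grow g s y h⟩) x
        exact h1.trans (pv_iter_memEq_of_closed g k s hcl x)
      exact pv_closed_congr g s _ (fun x => (hmem x).symm) hcl
    · -- strict growth: the grown set is strictly larger
      push Not at hall
      obtain ⟨y, hy, hys⟩ := hall
      have hnd' : (pvGrow g s).Nodup := pv_nodup_grow g s
      have hlen' : s.length + 1 ≤ (pvGrow g s).length := by
        have hssub : s.toFinset ⊂ (pvGrow g s).toFinset := by
          constructor
          · intro x hx
            rw [List.mem_toFinset] at hx ⊢
            exact pv_sub_grow g s x hx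
          · intro hcon
            have : y ∈ s := List.mem_toFinset.mp (hcon (List.mem_toFinset.mpr hy))
            exact hys this
        have := Finset.card_lt_card hssub
        rw [List.toFinset_card_of_nodup hnd, List.toFinset_card_of_nodup hnd'] at this
        omega
      exact ih (pvGrow g s) hnd' (pv_grow_sub_verts node g s hsub)
        (by omega)

lemma pv_node_mem_reach (node : String) (g : List (String × List String)) :
    node ∈ pvReach node g :=
  pv_sub_iter g _ [node] node (List.mem_singleton.mpr rfl)

lemma pv_reach_closed (node : String) (g : List (String × List String)) :
    pvClosed g (pvReach node g) := by
  apply pv_iter_closed node g (pvNv node g) [node]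
  · exact List.nodup_singleton node
  · intro x hx
    rw [List.mem_singleton] at hx
    subst hx
    exact List.mem_cons_self ..
  · simp

lemma pv_reach_sub_verts (node : String) (g : List (String × List String)) :
    ∀ x ∈ pvReach node g, x ∈ pvVerts node g := by
  apply pv_iter_sub_verts
  intro x hx
  rw [List.mem_singleton] at hx
  subst hx
  exact List.mem_cons_self ..

lemma pv_desc_closed (node : String) (g : List (String × List String)) (y : String) :
    pvClosed g (pvDesc node g y) := by
  show pvClosed g (pvIter g (pvNv node g) (pvGrow g (pvChld g y)))
  apply pv_iter_closed node g (pvNv node g) (pvGrow g (pvChld g y))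
  · exact pv_nodup_grow g _
  · exact pv_grow_sub_verts node g _ (fun x hx => pv_chld_sub_verts node g y x hx)
  · omega

lemma pv_chld_sub_desc (node : String) (g : List (String × List String)) (y c : String)
    (hc : c ∈ pvChld g y) : c ∈ pvDesc node g y := by
  show c ∈ pvIter g (pvNv node g) (pvGrow g (pvChld g y))
  exact pv_sub_iter g _ _ c (pv_sub_grow g _ c hc)

-- ---- paths ----

lemma pv_path_sub (g : List (String × List String)) (S : List String) (hcl : pvClosed g S) :
    ∀ (p : List String) (a : String), a ∈ S → pvPath g a p → ∀ b ∈ p, b ∈ S := by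
  intro p
  induction p with
  | nil => intro a _ _ b hb; cases hb
  | cons c rest ih =>
    intro a ha hp b hb
    rw [pvPath, List.isChain_cons_cons] at hp
    have hcS : c ∈ S := hcl a ha c hp.1
    rcases List.mem_cons.mp hb with hb | hb
    · subst hb; exact hcS
    · exact ih c hcS hp.2 b hb

lemma pv_path_mem_desc (node : String) (g : List (String × List String))
    (a : String) (p : List String) (hp : pvPath g a p) : ∀ b ∈ p, b ∈ pvDesc node g a := by
  cases p with
  | nil => intro b hb; cases hb
  | cons c rest =>
    rw [pvPath, List.isChain_cons_cons] at hp
    have hcd : c ∈ pvDesc node g a := pv_chld_sub_desc node g a c hp.1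
    intro b hb
    rcases List.mem_cons.mp hb with hb | hb
    · subst hb; exact hcd
    · exact pv_path_sub g _ (pv_desc_closed node g a) rest c hcd hp.2 b hb

lemma pv_dup_cycle (g : List (String × List String)) :
    ∀ (p : List String) (a : String), pvPath g a p → ¬ (a :: p).Nodup →
    ∃ x q, pvPath g x q ∧ x ∈ q ∧ x ∈ a :: p := by
  intro p
  induction p with
  | nil => intro a _ hnd; exact absurd (List.nodup_singleton a) hnd
  | cons c rest ih =>
    intro a hp hnd
    rw [pvPath, List.isChain_cons_cons] at hp
    by_cases ha : a ∈ c :: rest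
    · exact ⟨a, c :: rest, by rw [pvPath, List.isChain_cons_cons]; exact hp, ha, List.mem_cons_self ..⟩
    · have : ¬ (c :: rest).Nodup := by
        intro hcon
        exact hnd (List.nodup_cons.mpr ⟨ha, hcon⟩)
      obtain ⟨x, q, hq, hxq, hxm⟩ := ih c hp.2 this
      exact ⟨x, q, hq, hxq, List.mem_cons_of_mem a hxm⟩

lemma pv_path_nodup (node : String) (g : List (String × List String))
    (hpre : Pre_get_longest_path_from_node node g) (a : String) (p : List String)
    (ha : a ∈ pvReach node g) (hp : pvPath g a p) : (a :: p).Nodup := by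
  by_contra hnd
  obtain ⟨x, q, hq, hxq, hxm⟩ := pv_dup_cycle g p a hp hnd
  have hxr : x ∈ pvReach node g := by
    rcases List.mem_cons.mp hxm with h | h
    · subst h; exact ha
    · exact pv_path_sub g _ (pv_reach_closed node g) p a ha hp x h
  exact hpre x hxr (pv_path_mem_desc node g x q hq x hxq)

lemma pv_path_len (node : String) (g : List (String × List String))
    (hpre : Pre_get_longest_path_from_node node g) (a : String) (p : List String)
    (ha : a ∈ pvReach node g) (hp : pvPath g a p) : p.length < pvNv node g := by
  have hnd := pv_path_nodup node g hpre a p ha hp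
  have hsub : ∀ x ∈ a :: p, x ∈ pvVerts node g := by
    intro x hx
    rcases List.mem_cons.mp hx with h | h
    · exact h ▸ pv_reach_sub_verts node g a ha
    · exact pv_reach_sub_verts node g x
        (pv_path_sub g _ (pv_reach_closed node g) p a ha hp x h)
  have := pv_len_le (a :: p) (pvVerts node g) hnd hsub
  simp only [List.length_cons] at this
  exact lt_of_lt_of_le (Nat.lt_succ_self _) this

-- ---- depth ----

lemma pv_foldl_max_attain (l : List Int) : ∀ i : Int, l.foldl max i = i ∨ l.foldl max i ∈ l := by
  induction l with
  | nil => intro i; exact Or.inl rfl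
  | cons x xs ih =>
    intro i
    simp only [List.foldl_cons]
    rcases ih (max i x) with h | h
    · rcases max_choice i x with h' | h'
      · exact Or.inl (h.trans h')
      · exact Or.inr (by rw [h, h']; exact List.mem_cons_self ..)
    · exact Or.inr (List.mem_cons_of_mem x h)

lemma pv_depth_nonneg (g : List (String × List String)) :
    ∀ (f : Nat) (n : String), 0 ≤ pvDepth g f n := by
  intro f
  induction f with
  | zero => intro n; simp [pvDepth]
  | succ f ih =>
    intro n
    show 0 ≤ pvDepth g (f+1) n
    rw [pvDepth]
    cases hch : pvChld g n with
    | nil => simp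
    | cons c cs =>
      simp only
      have h1 : pvDepth g f c ≤ (cs.map (pvDepth g f)).foldl max (pvDepth g f c) :=
        (PySem.List.le_foldl_max _ _).1
      have := ih c
      omega

lemma pv_depth_path (g : List (String × List String)) :
    ∀ (f : Nat) (n : String), ∃ p, pvPath g n p ∧ (p.length : Int) = pvDepth g f n := by
  intro f
  induction f with
  | zero => intro n; exact ⟨[], by rw [pvPath]; exact List.isChain_singleton _, by simp [pvDepth]⟩
  | succ f ih =>
    intro n
    rw [pvDepth]
    cases hch : pvChld g n with
    | nil => exact ⟨[], by rw [pvPath]; exact List.isChain_singleton _, by simp⟩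
    | cons c cs =>
      simp only
      have hatt := pv_foldl_max_attain (cs.map (pvDepth g f)) (pvDepth g f c)
      have : ∃ c' ∈ pvChld g n,
          pvDepth g f c' = (cs.map (pvDepth g f)).foldl max (pvDepth g f c) := by
        rcases hatt with h | h
        · exact ⟨c, by rw [hch]; exact List.mem_cons_self .., h.symm⟩
        · rw [List.mem_map] at h
          obtain ⟨c', hc', he⟩ := h
          exact ⟨c', by rw [hch]; exact List.mem_cons_of_mem c hc', he⟩
      obtain ⟨c', hc', he⟩ := this
      obtain ⟨p', hp', hl'⟩ := ih c'
      refine ⟨c' :: p', ?_, ?_⟩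
      · rw [pvPath, List.isChain_cons_cons]; exact ⟨hc', hp'⟩
      · simp only [List.length_cons]
        push_cast
        rw [hl', he]
        ring

lemma pv_path_depth (g : List (String × List String)) :
    ∀ (p : List String) (f : Nat) (n : String), pvPath g n p → p.length < f →
    (p.length : Int) ≤ pvDepth g f n := by
  intro p
  induction p with
  | nil => intro f n _ _; simpa using pv_depth_nonneg g f n
  | cons c rest ih =>
    intro f n hp hf
    rw [pvPath, List.isChain_cons_cons] at hp
    obtain ⟨f', rfl⟩ : ∃ f', f = f' + 1 := ⟨f - 1, by omega⟩
    rw [pvDepth]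
    cases hch : pvChld g n with
    | nil => rw [hch] at hp; cases hp.1
    | cons c0 cs =>
      simp only
      have hcle : pvDepth g f' c ≤ (cs.map (pvDepth g f')).foldl max (pvDepth g f' c0) := by
        have hc := hp.1
        rw [hch] at hc
        rcases List.mem_cons.mp hc with h | h
        · subst h; exact (PySem.List.le_foldl_max _ _).1
        · exact (PySem.List.le_foldl_max _ _).2 _ (List.mem_map.mpr ⟨c, h, rfl⟩)
      have hrest : (rest.length : Int) ≤ pvDepth g f' c := by
        apply ih f' c hp.2
        simp only [List.length_cons] at hf
        omega
      simp only [List.length_cons]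
      push_cast
      omega

lemma pv_depth_lt_nv (node : String) (g : List (String × List String))
    (hpre : Pre_get_longest_path_from_node node g) (n : String) (hn : n ∈ pvReach node g)
    (f : Nat) : pvDepth g f n < (pvNv node g : Int) := by
  obtain ⟨p, hp, hl⟩ := pv_depth_path g f n
  rw [← hl]
  exact_mod_cast pv_path_len node g hpre n p hn hp

lemma pv_depth_stable (node : String) (g : List (String × List String))
    (hpre : Pre_get_longest_path_from_node node g) (n : String) (hn : n ∈ pvReach node g)
    (f f' : Nat) (hf : pvNv node g ≤ f) (hf' : pvNv node g ≤ f') :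
    pvDepth g f n = pvDepth g f' n := by
  have h1 : pvDepth g f n ≤ pvDepth g f' n := by
    obtain ⟨p, hp, hl⟩ := pv_depth_path g f n
    rw [← hl]
    apply pv_path_depth g p f' n hp
    have := pv_path_len node g hpre n p hn hp
    omega
  have h2 : pvDepth g f' n ≤ pvDepth g f n := by
    obtain ⟨p, hp, hl⟩ := pv_depth_path g f' n
    rw [← hl]
    apply pv_path_depth g p f n hp
    have := pv_path_len node g hpre n p hn hp
    omega
  omega

lemma pv_depth_zero_of_no_chld (g : List (String × List String)) (n : String)
    (hch : pvChld g n = []) (f : Nat) : pvDepth g f n = 0 := by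
  cases f with
  | zero => rfl
  | succ f => rw [pvDepth, hch]

lemma pv_child_depth_lt (node : String) (g : List (String × List String))
    (hpre : Pre_get_longest_path_from_node node g) (n : String) (hn : n ∈ pvReach node g)
    (c : String) (hc : c ∈ pvChld g n) :
    pvDepth g (pvNv node g) c + 1 ≤ pvDepth g (pvNv node g) n := by
  have hstab := pv_depth_stable node g hpre n hn (pvNv node g) (pvNv node g + 1)
    le_rfl (by omega)
  rw [hstab, pvDepth]
  cases hch : pvChld g n with
  | nil => rw [hch] at hc; cases hc
  | cons c0 cs =>
    simp only
    rw [hch] at hc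
    rcases List.mem_cons.mp hc with h | h
    · subst h
      have := (PySem.List.le_foldl_max (cs.map (pvDepth g (pvNv node g))) (pvDepth g (pvNv node g) c)).1
      omega
    · have := (PySem.List.le_foldl_max (cs.map (pvDepth g (pvNv node g))) (pvDepth g (pvNv node g) c0)).2
        _ (List.mem_map.mpr ⟨c, h, rfl⟩)
      omega

lemma pv_depth_succ_unfold (node : String) (g : List (String × List String))
    (hpre : Pre_get_longest_path_from_node node g) (n : String) (hn : n ∈ pvReach node g)
    (c : String) (cs : List String) (hch : pvChld g n = c :: cs) :
    pvDepth g (pvNv node g) n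
      = 1 + (cs.map (pvDepth g (pvNv node g))).foldl max (pvDepth g (pvNv node g) c) := by
  have hstab := pv_depth_stable node g hpre n hn (pvNv node g) (pvNv node g + 1)
    le_rfl (by omega)
  rw [hstab, pvDepth, hch]

-- ---- correctness of port A ----

def pvInv (node : String) (g : List (String × List String))
    (memo : PySem.Dict String Int) : Prop :=
  ∀ k v, memo.get? k = some v → k ∈ pvReach node g ∧ v = pvDepth g (pvNv node g) k

lemma pv_inv_insert (node : String) (g : List (String × List String))
    (memo : PySem.Dict String Int) (hm : pvInv node g memo) (n : String)
    (hn : n ∈ pvReach node g) (v : Int) (hv : v = pvDepth g (pvNv node g) n) :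
    pvInv node g (PySem.Dict.insert memo n v) := by
  intro k w hk
  rw [PySem.Dict.get?_insert] at hk
  split at hk
  · rename_i h
    subst h
    cases hk
    exact ⟨hn, hv⟩
  · exact hm k w hk

lemma pv_dfsA_correct (node : String) (g : List (String × List String))
    (hpre : Pre_get_longest_path_from_node node g) :
    ∀ (f : Nat) (n : String) (memo : PySem.Dict String Int), n ∈ pvReach node g →
    pvInv node g memo → pvDepth g (pvNv node g) n < (f : Int) →
    (pvDfsA g f memo n).1 = pvDepth g (pvNv node g) n ∧ pvInv node g (pvDfsA g f memo n).2 := by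
  intro f
  induction f with
  | zero =>
    intro n memo _ _ hlt
    have := pv_depth_nonneg g (pvNv node g) n
    omega
  | succ f ih =>
    intro n memo hn hinv hlt
    rw [pvDfsA]
    cases hmem : memo.get? n with
    | some v =>
      simp only
      obtain ⟨_, hv⟩ := hinv n v hmem
      exact ⟨hv, hinv⟩
    | none =>
      simp only
      cases hch : pvChld g n with
      | nil =>
        simp only
        have hz := pv_depth_zero_of_no_chld g n hch (pvNv node g)
        exact ⟨hz.symm, pv_inv_insert node g memo hinv n hn 0 hz.symm⟩
      | cons c cs =>
        simp only
        -- per-child facts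
        have hchildren : ∀ c' ∈ pvChld g n, c' ∈ pvReach node g ∧
            pvDepth g (pvNv node g) c' < (f : Int) := by
          intro c' hc'
          refine ⟨pv_reach_closed node g n hn c' hc', ?_⟩
          have := pv_child_depth_lt node g hpre n hn c' hc'
          omega
        have hc0 : c ∈ pvChld g n := by rw [hch]; exact List.mem_cons_self ..
        have hcs : ∀ c' ∈ cs, c' ∈ pvChld g n := by
          intro c' h; rw [hch]; exact List.mem_cons_of_mem c h
        obtain ⟨hr0v, hr0i⟩ := ih c memo (hchildren c hc0).1 hinv (hchildren c hc0).2
        -- the fold over the remaining children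
        have hfold : ∀ (l : List String), (∀ c' ∈ l, c' ∈ pvChld g n) →
            ∀ (v0 : Int) (m0 : PySem.Dict String Int), pvInv node g m0 →
            (l.foldl (fun acc ch =>
                (max acc.1 (pvDfsA g f acc.2 ch).1, (pvDfsA g f acc.2 ch).2)) (v0, m0)).1
              = (l.map (pvDepth g (pvNv node g))).foldl max v0
            ∧ pvInv node g (l.foldl (fun acc ch =>
                (max acc.1 (pvDfsA g f acc.2 ch).1, (pvDfsA g f acc.2 ch).2)) (v0, m0)).2 := by
          intro l
          induction l with
          | nil => intro _ v0 m0 hm0; exact ⟨rfl, hm0⟩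
          | cons x xs ihl =>
            intro hl v0 m0 hm0
            have hx := hchildren x (hl x (List.mem_cons_self ..))
            obtain ⟨hxv, hxi⟩ := ih x m0 hx.1 hm0 hx.2
            simp only [List.foldl_cons, List.map_cons]
            rw [hxv]
            exact ihl (fun c' h => hl c' (List.mem_cons_of_mem x h))
              (max v0 (pvDepth g (pvNv node g) x)) (pvDfsA g f m0 x).2 hxi
        obtain ⟨hfv, hfi⟩ := hfold cs hcs (pvDfsA g f memo c).1 (pvDfsA g f memo c).2 hr0i
        have hpair : pvDfsA g f memo c = ((pvDfsA g f memo c).1, (pvDfsA g f memo c).2) := rfl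
        rw [hpair]
        have hval : 1 + (cs.foldl (fun acc ch =>
            (max acc.1 (pvDfsA g f acc.2 ch).1, (pvDfsA g f acc.2 ch).2))
            ((pvDfsA g f memo c).1, (pvDfsA g f memo c).2)).1
            = pvDepth g (pvNv node g) n := by
          rw [hfv, hr0v, ← pv_depth_succ_unfold node g hpre n hn c cs hch]
        exact ⟨hval, pv_inv_insert node g _ hfi n hn _ hval⟩

-- ---- correctness of port B ----

def pvNodesB (node : String) (g : List (String × List String)) : PySem.Set String :=
  g.foldl (fun s kv => PySem.Set.update (PySem.Set.add s kv.1) kv.2) (PySem.Set.ofList [node])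

lemma pv_nodesB_mem_aux (l : List (String × List String)) :
    ∀ (s : PySem.Set String) (x : String),
    x ∈ l.foldl (fun s kv => PySem.Set.update (PySem.Set.add s kv.1) kv.2) s ↔
    x ∈ s ∨ ∃ kv ∈ l, x = kv.1 ∨ x ∈ kv.2 := by
  induction l with
  | nil => intro s x; simp
  | cons kv rest ih =>
    intro s x
    rw [List.foldl_cons, ih]
    simp only [PySem.Set.mem_update, PySem.Set.mem_add, List.mem_cons]
    constructor
    · rintro (((h | h) | h) | ⟨kv', h', h''⟩)
      · exact Or.inl h
      · exact Or.inr ⟨kv, Or.inl rfl, Or.inl h⟩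
      · exact Or.inr ⟨kv, Or.inl rfl, Or.inr h⟩
      · exact Or.inr ⟨kv', Or.inr h', h''⟩
    · rintro (h | ⟨kv', h' | h', h''⟩)
      · exact Or.inl (Or.inl (Or.inl h))
      · subst h'
        rcases h'' with h'' | h''
        · exact Or.inl (Or.inl (Or.inr h''))
        · exact Or.inl (Or.inr h'')
      · exact Or.inr ⟨kv', h', h''⟩

lemma pv_nodesB_mem (node : String) (g : List (String × List String)) (x : String) :
    x ∈ pvNodesB node g ↔ x ∈ pvVerts node g := by
  rw [pvNodesB, pv_nodesB_mem_aux]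
  simp only [PySem.Set.mem_ofList, pvVerts, List.mem_cons, List.mem_flatMap]
  simp

lemma pv_nodesB_nodup (node : String) (g : List (String × List String)) :
    (pvNodesB node g).Nodup := by
  rw [pvNodesB]
  have : ∀ (l : List (String × List String)) (s : PySem.Set String), s.Nodup →
      (l.foldl (fun s kv => PySem.Set.update (PySem.Set.add s kv.1) kv.2) s).Nodup := by
    intro l
    induction l with
    | nil => intro s hs; exact hs
    | cons kv rest ih =>
      intro s hs
      exact ih _ (PySem.Set.nodup_update _ _ (PySem.Set.nodup_add _ _ hs))
  exact this g _ (PySem.Set.nodup_ofList _)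

lemma pv_nodesB_len (node : String) (g : List (String × List String)) :
    (pvNodesB node g).length = pvNv node g := by
  have h1 : (pvNodesB node g).toFinset = (PySem.List.dedup (pvVerts node g)).toFinset := by
    ext x
    rw [List.mem_toFinset, List.mem_toFinset, PySem.List.mem_dedup, pv_nodesB_mem]
  have h2 := List.toFinset_card_of_nodup (pv_nodesB_nodup node g)
  have h3 := List.toFinset_card_of_nodup (PySem.List.nodup_dedup (pvVerts node g))
  rw [pvNv, ← h2, ← h3, h1]

-- the value pvStepB writes for key n, as a function of the previous dict
def pvValB (g : List (String × List String)) (d : PySem.Dict String Int) (n : String) : Int :=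
  match pvChld g n with
  | [] => 0
  | c :: cs => 1 + cs.foldl (fun m c' => max m (PySem.Dict.getD d c' 0)) (PySem.Dict.getD d c 0)

lemma pv_stepB_eq (g : List (String × List String)) (nodes : List String)
    (d : PySem.Dict String Int) :
    pvStepB g nodes d
      = nodes.foldl (fun nd n => PySem.Dict.insert nd n (pvValB g d n)) PySem.Dict.empty := by
  rw [pvStepB]
  congr 1
  funext nd n
  rw [pvValB]
  cases pvChld g n <;> simp

lemma pv_get?_foldl_insert_not_mem (l : List String) (val : String → Int) (x : String)
    (hx : x ∉ l) : ∀ (d0 : PySem.Dict String Int),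
    (l.foldl (fun d n => PySem.Dict.insert d n (val n)) d0).get? x = d0.get? x := by
  induction l with
  | nil => intro d0; rfl
  | cons y ys ih =>
    intro d0
    simp only [List.foldl_cons]
    rw [ih (fun h => hx (List.mem_cons_of_mem y h))]
    apply PySem.Dict.get?_insert_of_ne
    intro h
    subst h
    exact hx (List.mem_cons_self ..)
    
lemma pv_get?_foldl_insert_mem (l : List String) (val : String → Int)
    (hnd : l.Nodup) (x : String) (hx : x ∈ l) : ∀ (d0 : PySem.Dict String Int),
    (l.foldl (fun d n => PySem.Dict.insert d n (val n)) d0).get? x = some (val x) := by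
  induction l with
  | nil => cases hx
  | cons y ys ih =>
    intro d0
    simp only [List.foldl_cons]
    rcases List.mem_cons.mp hx with h | h
    · subst h
      rw [pv_get?_foldl_insert_not_mem ys val x (List.nodup_cons.mp hnd).1]
      apply PySem.Dict.get?_insert_self
    · exact ih (List.nodup_cons.mp hnd).2 h (PySem.Dict.insert d0 y (val y))

lemma pv_valB_depth (node : String) (g : List (String × List String))
    (d : PySem.Dict String Int) (i : Nat)
    (hd : ∀ m ∈ pvVerts node g, PySem.Dict.getD d m 0 = pvDepth g i m) (n : String) :
    pvValB g d n = pvDepth g (i+1) n := by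
  rw [pvValB, pvDepth]
  cases hch : pvChld g n with
  | nil => rfl
  | cons c cs =>
    simp only
    have hc : PySem.Dict.getD d c 0 = pvDepth g i c :=
      hd c (pv_chld_sub_verts node g n c (by rw [hch]; exact List.mem_cons_self ..))
    have hcs : ∀ c' ∈ cs, PySem.Dict.getD d c' 0 = pvDepth g i c' := by
      intro c' h
      exact hd c' (pv_chld_sub_verts node g n c'
        (by rw [hch]; exact List.mem_cons_of_mem c h))
    rw [hc, List.foldl_map]
    congr 1
    exact PySem.List.foldl_congr_mem cs _ _ _ (fun acc x hx => by rw [hcs x hx])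

lemma pv_stepB_get? (node : String) (g : List (String × List String))
    (d : PySem.Dict String Int) (i : Nat)
    (hd : ∀ m ∈ pvVerts node g, PySem.Dict.getD d m 0 = pvDepth g i m)
    (m : String) (hm : m ∈ pvNodesB node g) :
    (pvStepB g (pvNodesB node g) d).get? m = some (pvDepth g (i+1) m) := by
  rw [pv_stepB_eq, pv_get?_foldl_insert_mem _ _ (pv_nodesB_nodup node g) m hm]
  congr 1
  exact pv_valB_depth node g d i hd m

-- once one relaxation round changes nothing, no later round does
lemma pv_depth_stab_from (node : String) (g : List (String × List String)) (i : Nat)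
    (hstab : ∀ m ∈ pvVerts node g, pvDepth g (i+1) m = pvDepth g i m) :
    ∀ (j : Nat), ∀ m ∈ pvVerts node g, pvDepth g (i+j) m = pvDepth g i m := by
  intro j
  induction j with
  | zero => intro m _; rfl
  | succ j ih =>
    intro m hm
    rw [show i + (j+1) = (i+j)+1 from rfl, ← hstab m hm]
    show pvDepth g ((i+j)+1) m = pvDepth g (i+1) m
    rw [pvDepth, pvDepth]
    cases hch : pvChld g m with
    | nil => rfl
    | cons c cs =>
      simp only
      have hcv : c ∈ pvVerts node g := pv_chld_sub_verts node g m c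
        (by rw [hch]; exact List.mem_cons_self ..)
      have hcs : cs.map (pvDepth g (i+j)) = cs.map (pvDepth g i) :=
        List.map_congr_left (fun x hx => ih x (pv_chld_sub_verts node g m x
          (by rw [hch]; exact List.mem_cons_of_mem c hx)))
      rw [ih c hcv, hcs]

lemma pv_loopB_correct (node : String) (g : List (String × List String)) :
    ∀ (k i : Nat) (d : PySem.Dict String Int),
    (∀ m ∈ pvNodesB node g, d.get? m = some (pvDepth g i m)) →
    ∀ m ∈ pvNodesB node g,
    (pvLoopB g (pvNodesB node g) k d).get? m = some (pvDepth g (i+k) m) := by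
  intro k
  induction k with
  | zero => intro i d hd m hm; rw [pvLoopB, hd m hm, Nat.add_zero]
  | succ k ih =>
    intro i d hd m hm
    rw [pvLoopB]
    have hgetD : ∀ m' ∈ pvVerts node g, PySem.Dict.getD d m' 0 = pvDepth g i m' := by
      intro m' hm'
      rw [PySem.Dict.getD_eq_get?_getD, hd m' ((pv_nodesB_mem node g m').mpr hm')]
      rfl
    have hnd : ∀ m' ∈ pvNodesB node g,
        (pvStepB g (pvNodesB node g) d).get? m' = some (pvDepth g (i+1) m') :=
      fun m' hm' => pv_stepB_get? node g d i hgetD m' hm'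
    by_cases heq : pvStepB g (pvNodesB node g) d = d
    · rw [if_pos heq]
      have hstab : ∀ m' ∈ pvVerts node g, pvDepth g (i+1) m' = pvDepth g i m' := by
        intro m' hm'
        have h1 := hnd m' ((pv_nodesB_mem node g m').mpr hm')
        rw [heq, hd m' ((pv_nodesB_mem node g m').mpr hm')] at h1
        exact (Option.some_inj.mp h1).symm
      rw [hd m hm]
      congr 1
      exact (pv_depth_stab_from node g i hstab (k+1) m ((pv_nodesB_mem node g m).mp hm)).symm
    · rw [if_neg heq]
      have := ih (i+1) (pvStepB g (pvNodesB node g) d) hnd m hm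
      rw [this]
      congr 2
      omega

-- ---- the two ports compute the same value ----

theorem pv_main : ∀ (node : String) (g : List (String × List String)),
    Pre_get_longest_path_from_node node g →
    get_longest_path_from_node node g = get_longest_path_from_node_alt node g := by
  intro node g hpre
  -- A computes pvDepth g (pvNv node g) node
  have hA : get_longest_path_from_node node g = pvDepth g (pvNv node g) node := by
    rw [get_longest_path_from_node]
    have hemp : pvInv node g PySem.Dict.empty := by
      intro k v hk
      rw [PySem.Dict.get?_empty] at hk
      cases hk
    have hlt : pvDepth g (pvNv node g) node < ((pvNv node g + 1 : Nat) : Int) := by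
      have := pv_depth_lt_nv node g hpre node (pv_node_mem_reach node g) (pvNv node g)
      push_cast
      omega
    exact (pv_dfsA_correct node g hpre (pvNv node g + 1) node PySem.Dict.empty
      (pv_node_mem_reach node g) hemp hlt).1
  -- B computes pvDepth g (pvNv node g) node
  have hB : get_longest_path_from_node_alt node g = pvDepth g (pvNv node g) node := by
    rw [get_longest_path_from_node_alt]
    have hnode : node ∈ pvNodesB node g :=
      (pv_nodesB_mem node g node).mpr (List.mem_cons_self ..)
    have hd0 : ∀ m ∈ pvNodesB node g,
        ((pvNodesB node g).foldl (fun d n => PySem.Dict.insert d n (0 : Int))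
          PySem.Dict.empty).get? m = some (pvDepth g 0 m) := by
      intro m hm
      rw [pv_get?_foldl_insert_mem _ (fun _ => (0 : Int)) (pv_nodesB_nodup node g) m hm]
      rfl
    have hfin := pv_loopB_correct node g (pvNodesB node g).length 0 _ hd0 node hnode
    rw [pv_nodesB_len node g, Nat.zero_add] at hfin
    show (PySem.Dict.getD (pvLoopB g (pvNodesB node g) (pvNodesB node g).length
      ((pvNodesB node g).foldl (fun d n => PySem.Dict.insert d n (0 : Int))
        PySem.Dict.empty)) node 0) = _
    rw [pv_nodesB_len node g, PySem.Dict.getD_eq_get?_getD, hfin]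
    rfl
  rw [hA, hB]

-- ===== VERDICT (by name: the statement is the Claim_ definition above) =====
theorem get_longest_path_from_node_spec : Claim_equal_get_longest_path_from_node := by
  intro node g _ hpre
  exact pv_main node g hpre
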